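-- pv_equiv track=rewrite | github.com/dtunc91/flightfinder | app.py | _search_local_airports
-- ===== SOURCE A (Python) =====
-- import unicodedata
--
-- def _normalize(s: str) -> str:
--     if not s:
--         return ""
--     s = unicodedata.normalize("NFKD", s)
--     s = "".join(ch for ch in s if not unicodedata.combining(ch))
--     return s.lower().strip()
--
-- def _search_local_airports(q: str, pool: list) -> list:
--     """Smart search: code prefix > name/city prefix > substring."""
--     qs = _normalize(q)
--     if not qs:
--         return []
--     code_pref, name_pref, substr = [], [], []
--     for a in pool:
--         code = (a.get("code") or "")
--         label = a.get("label") or ""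
--         city = a.get("city") or ""
--         blob = f"{_normalize(label)} {_normalize(city)}".strip()
--
--         if code.lower().startswith(qs):
--             code_pref.append(a)
--         elif blob.startswith(qs):
--             name_pref.append(a)
--         elif qs in blob:
--             substr.append(a)
--
--     # merge unique keeping order
--     seen, out = set(), []
--     for bucket in (code_pref, name_pref, substr):
--         for a in bucket:
--             c = a["code"]
--             if c not in seen:
--                 out.append(a)
--                 seen.add(c)
--
--     return out[:25]
-- ===== SOURCE B (Python) =====
-- import unicodedata
--
-- def _normalize(s: str) -> str:
--     if not s:
--         return ""
--     s = unicodedata.normalize("NFKD", s)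
--     s = "".join(ch for ch in s if not unicodedata.combining(ch))
--     return s.lower().strip()
--
-- def _search_local_airports(q: str, pool: list) -> list:
--     """Single pass ranking + stable sort by rank + dict-based dedup."""
--     qs = _normalize(q)
--     if not qs:
--         return []
--     ranked = []
--     for a in pool:
--         code = (a.get("code") or "")
--         label = a.get("label") or ""
--         city = a.get("city") or ""
--         blob = f"{_normalize(label)} {_normalize(city)}".strip()
--         if code.lower().startswith(qs):
--             ranked.append((0, a))
--         elif blob.startswith(qs):
--             ranked.append((1, a))
--         elif qs in blob:
--             ranked.append((2, a))
--     ranked.sort(key=lambda t: t[0])  # stable: keeps pool order within each rank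
--     first = {}
--     for _, a in ranked:
--         first.setdefault(a["code"], a)
--     return list(first.values())[:25]
-- ===== Notes on version B (the rewrite author's own statement) =====
-- stated objective: alternative
-- what changed: A's three explicit category buckets concatenated by a merge loop with a seen-set become a single pass that labels each hit with a priority rank, one stable sort keyed on the rank, and a dict-based dedup via setdefault/values.
import Mathlib
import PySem

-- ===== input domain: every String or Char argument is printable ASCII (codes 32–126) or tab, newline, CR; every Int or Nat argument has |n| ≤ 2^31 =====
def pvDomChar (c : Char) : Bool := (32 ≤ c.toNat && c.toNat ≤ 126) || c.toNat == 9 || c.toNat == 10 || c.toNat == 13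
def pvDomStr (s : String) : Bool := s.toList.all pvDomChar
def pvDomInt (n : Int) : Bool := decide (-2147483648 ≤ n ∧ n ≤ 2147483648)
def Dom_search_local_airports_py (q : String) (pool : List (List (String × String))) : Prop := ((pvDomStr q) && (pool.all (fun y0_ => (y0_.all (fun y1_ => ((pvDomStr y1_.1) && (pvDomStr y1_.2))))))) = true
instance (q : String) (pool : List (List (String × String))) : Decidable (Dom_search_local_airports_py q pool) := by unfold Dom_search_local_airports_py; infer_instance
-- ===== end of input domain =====

-- B replaces A's three explicit buckets + set-based merge loop by a single-pass rank
-- labelling, one stable sort on the rank, and a dict-based dedup (setdefault/values);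
-- same return value, no speed claim (objective: alternative).

-- ===== PORT A =====
-- _normalize: NFKD normalisation and combining-mark removal are the identity on the
-- printable-ASCII domain, so on Dom the function is exactly lower-then-strip.
def pyNormalize (s : String) : String :=
  if s = "" then "" else PySem.Str.strip (PySem.Str.lower s)

-- a.get(k) or "" : missing key and empty value both give "" (values are strings), = getD "".
def pyCodeOf (a : List (String × String)) : String := ((PySem.Dict.mk a).get? "code").getD ""

-- blob = f"{_normalize(label)} {_normalize(city)}".strip()
def pyBlobOf (a : List (String × String)) : String :=
  PySem.Str.strip (PySem.Str.join " "
    [pyNormalize (((PySem.Dict.mk a).get? "label").getD ""),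
     pyNormalize (((PySem.Dict.mk a).get? "city").getD "")])

def search_local_airports_py (q : String) (pool : List (List (String × String))) : List (List (String × String)) :=
  let qs := pyNormalize q
  if qs = "" then []
  else
    -- for a in pool: append a to code_pref / name_pref / substr
    let bs := pool.foldl
      (fun (st : List (List (String × String)) × List (List (String × String)) × List (List (String × String))) a =>
        let code := pyCodeOf a
        let blob := pyBlobOf a
        if PySem.Str.startswith (PySem.Str.lower code) qs then (st.1 ++ [a], st.2.1, st.2.2)
        else if PySem.Str.startswith blob qs then (st.1, st.2.1 ++ [a], st.2.2)
        else if PySem.Str.isIn qs blob then (st.1, st.2.1, st.2.2 ++ [a])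
        else st)
      ([], [], [])
    -- merge unique keeping order; a["code"] ported as getD "" (the KeyError case is outside Pre_)
    let merged := (bs.1 ++ bs.2.1 ++ bs.2.2).foldl
      (fun (st : PySem.Set String × List (List (String × String))) a =>
        let c := pyCodeOf a
        if PySem.Set.contains st.1 c then st else (PySem.Set.add st.1 c, st.2 ++ [a]))
      (PySem.Set.empty, [])
    merged.2.take 25  -- out[:25]: exact, the bound is a nonnegative literal

-- ===== PORT B =====
def search_local_airports_py_alt (q : String) (pool : List (List (String × String))) : List (List (String × String)) :=
  let qs := pyNormalize q
  if qs = "" then []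
  else
    -- single pass: label every hit with its rank
    let ranked := pool.foldl
      (fun (acc : List (Nat × List (String × String))) a =>
        let code := pyCodeOf a
        let blob := pyBlobOf a
        if PySem.Str.startswith (PySem.Str.lower code) qs then acc ++ [(0, a)]
        else if PySem.Str.startswith blob qs then acc ++ [(1, a)]
        else if PySem.Str.isIn qs blob then acc ++ [(2, a)]
        else acc)
      []
    -- ranked.sort(key=lambda t: t[0]) — stable
    let sortedRanked := PySem.List.sorted ranked (fun t => t.1)
    -- first.setdefault(a["code"], a); a["code"] ported as getD "" (KeyError outside Pre_)
    let first := sortedRanked.foldl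
      (fun (d : PySem.Dict String (List (String × String))) t => d.setdefault (pyCodeOf t.2) t.2)
      (PySem.Dict.mk [])
    first.values.take 25  -- list(first.values())[:25]

-- ===== PRECONDITION & SPEC =====
-- an airport matches the (non-empty) normalized query
def pvHit (qs : String) (a : List (String × String)) : Bool :=
  PySem.Str.startswith (PySem.Str.lower (pyCodeOf a)) qs
    || PySem.Str.startswith (pyBlobOf a) qs
    || PySem.Str.isIn qs (pyBlobOf a)

-- Pre_ excludes exactly the inputs on which A raises KeyError at a["code"]: some airport
-- dict that matches the non-empty normalized query has no "code" key (B raises there too).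
def Pre_search_local_airports_py (q : String) (pool : List (List (String × String))) : Prop :=
  ∀ a ∈ pool, pyNormalize q ≠ "" → pvHit (pyNormalize q) a = true →
    (PySem.Dict.mk a).contains "code" = true

instance (q : String) (pool : List (List (String × String))) : Decidable (Pre_search_local_airports_py q pool) := by
  unfold Pre_search_local_airports_py; infer_instance

def pvWitness_search_local_airports_py : String × (List (List (String × String))) :=
  ("ab", [[("code", "ABC"), ("label", "Abc Airport"), ("city", "Abcville")], [("code", "XYZ")]])

def Spec_search_local_airports_py (q : String) (pool : List (List (String × String))) (out : List (List (String × String))) : Prop := out = search_local_airports_py_alt q pool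
instance (q : String) (pool : List (List (String × String))) (out : List (List (String × String))) : Decidable (Spec_search_local_airports_py q pool out) := by unfold Spec_search_local_airports_py; infer_instance

-- ===== CLAIM (what is proved, stated in full; the proofs are below) =====
def Claim_equal_search_local_airports_py : Prop := ∀ (q : String) (pool : List (List (String × String))), Dom_search_local_airports_py q pool → Pre_search_local_airports_py q pool → Spec_search_local_airports_py q pool (search_local_airports_py q pool)

-- ===== LEMMAS AND PROOFS =====

-- the three (mutually exclusive) classification predicates, as A's if/elif chain reads them
def pvP0 (qs : String) (a : List (String × String)) : Bool :=
  PySem.Str.startswith (PySem.Str.lower (pyCodeOf a)) qs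
def pvP1 (qs : String) (a : List (String × String)) : Bool :=
  !pvP0 qs a && PySem.Str.startswith (pyBlobOf a) qs
def pvP2 (qs : String) (a : List (String × String)) : Bool :=
  !pvP0 qs a && !PySem.Str.startswith (pyBlobOf a) qs && PySem.Str.isIn qs (pyBlobOf a)

-- B's rank labelling as a filterMap
def pvRk (qs : String) (a : List (String × String)) : Option (Nat × List (String × String)) :=
  if pvP0 qs a then some (0, a) else if pvP1 qs a then some (1, a)
  else if pvP2 qs a then some (2, a) else none

lemma bucketsFold_eq (qs : String) (pool : List (List (String × String)))
    (c0 c1 c2 : List (List (String × String))) :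
    pool.foldl
      (fun (st : List (List (String × String)) × List (List (String × String)) × List (List (String × String))) a =>
        let code := pyCodeOf a
        let blob := pyBlobOf a
        if PySem.Str.startswith (PySem.Str.lower code) qs then (st.1 ++ [a], st.2.1, st.2.2)
        else if PySem.Str.startswith blob qs then (st.1, st.2.1 ++ [a], st.2.2)
        else if PySem.Str.isIn qs blob then (st.1, st.2.1, st.2.2 ++ [a])
        else st)
      (c0, c1, c2)
    = (c0 ++ pool.filter (pvP0 qs), c1 ++ pool.filter (pvP1 qs), c2 ++ pool.filter (pvP2 qs)) := by
  induction pool generalizing c0 c1 c2 with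
  | nil => simp
  | cons a pool ih =>
      simp only [List.foldl_cons]
      by_cases h0 : PySem.Str.startswith (PySem.Str.lower (pyCodeOf a)) qs = true
      · have e0 : pvP0 qs a = true := h0
        have e1 : pvP1 qs a = false := by simp only [pvP1, pvP0, h0, Bool.not_true, Bool.false_and]
        have e2 : pvP2 qs a = false := by simp only [pvP2, pvP0, h0, Bool.not_true, Bool.false_and]
        simp only [h0, reduceIte]
        rw [ih]
        simp [ e0, e1, e2]
      · have h0' : PySem.Str.startswith (PySem.Str.lower (pyCodeOf a)) qs = false := by
          simpa using h0
        have e0 : pvP0 qs a = false := h0'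
        by_cases h1 : PySem.Str.startswith (pyBlobOf a) qs = true
        · have e1 : pvP1 qs a = true := by simp only [pvP1, pvP0, h0', h1, Bool.not_false, Bool.and_true]
          have e2 : pvP2 qs a = false := by simp only [pvP2, pvP0, h0', h1, Bool.not_true, Bool.not_false, Bool.false_and, Bool.and_false]
          simp only [h0', h1, Bool.false_eq_true, reduceIte]
          rw [ih]
          simp [ e0, e1, e2]
        · have h1' : PySem.Str.startswith (pyBlobOf a) qs = false := by simpa using h1
          have e1 : pvP1 qs a = false := by simp only [pvP1, h1', Bool.and_false]
          by_cases h2 : PySem.Str.isIn qs (pyBlobOf a) = true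
          · have e2 : pvP2 qs a = true := by simp only [pvP2, pvP0, h0', h1', h2, Bool.not_false, Bool.and_true]
            simp only [h0', h1', h2, Bool.false_eq_true, reduceIte]
            rw [ih]
            simp [ e0, e1, e2]
          · have h2' : PySem.Str.isIn qs (pyBlobOf a) = false := by simpa using h2
            have e2 : pvP2 qs a = false := by simp only [pvP2, h2', Bool.and_false]
            simp only [h0', h1', h2', Bool.false_eq_true, reduceIte]
            rw [ih]
            simp [ e0, e1, e2]

lemma rankedFold_eq (qs : String) (pool : List (List (String × String)))
    (acc : List (Nat × List (String × String))) :
    pool.foldl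
      (fun (acc : List (Nat × List (String × String))) a =>
        let code := pyCodeOf a
        let blob := pyBlobOf a
        if PySem.Str.startswith (PySem.Str.lower code) qs then acc ++ [(0, a)]
        else if PySem.Str.startswith blob qs then acc ++ [(1, a)]
        else if PySem.Str.isIn qs blob then acc ++ [(2, a)]
        else acc)
      acc
    = acc ++ pool.filterMap (pvRk qs) := by
  induction pool generalizing acc with
  | nil => simp
  | cons a pool ih =>
      simp only [List.foldl_cons, List.filterMap_cons]
      by_cases h0 : PySem.Str.startswith (PySem.Str.lower (pyCodeOf a)) qs = true
      · have hr : pvRk qs a = some (0, a) := by simp only [pvRk, pvP0, h0, reduceIte]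
        simp only [h0, reduceIte, hr]
        rw [ih]
        simp
      · have h0' : PySem.Str.startswith (PySem.Str.lower (pyCodeOf a)) qs = false := by
          simpa using h0
        by_cases h1 : PySem.Str.startswith (pyBlobOf a) qs = true
        · have hr : pvRk qs a = some (1, a) := by simp only [pvRk, pvP0, pvP1, h0', h1, Bool.not_false, Bool.and_true, Bool.false_eq_true, reduceIte]
          simp only [h0', h1, Bool.false_eq_true, reduceIte, hr]
          rw [ih]
          simp
        · have h1' : PySem.Str.startswith (pyBlobOf a) qs = false := by simpa using h1
          by_cases h2 : PySem.Str.isIn qs (pyBlobOf a) = true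
          · have hr : pvRk qs a = some (2, a) := by simp only [pvRk, pvP0, pvP1, pvP2, h0', h1', h2, Bool.not_false, Bool.and_true, Bool.and_false, Bool.false_eq_true, reduceIte]
            simp only [h0', h1', h2, Bool.false_eq_true, reduceIte, hr]
            rw [ih]
            simp
          · have h2' : PySem.Str.isIn qs (pyBlobOf a) = false := by simpa using h2
            have hr : pvRk qs a = none := by simp only [pvRk, pvP0, pvP1, pvP2, h0', h1', h2', Bool.not_false, Bool.and_true, Bool.and_false, Bool.false_eq_true, reduceIte]
            simp only [h0', h1', h2', Bool.false_eq_true, reduceIte, hr]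
            exact ih acc

lemma rk_filter0 (qs : String) (pool : List (List (String × String))) :
    (pool.filterMap (pvRk qs)).filter (fun t => t.1 == 0)
      = (pool.filter (pvP0 qs)).map (fun a => (0, a)) := by
  induction pool with
  | nil => simp
  | cons a pool ih =>
      simp only [List.filterMap_cons, List.filter_cons]
      by_cases e0 : pvP0 qs a = true
      · have hr : pvRk qs a = some (0, a) := by simp [pvRk, e0]
        have e1 : pvP1 qs a = false := by simp only [pvP1, e0, Bool.not_true, Bool.false_and]
        have e2 : pvP2 qs a = false := by simp only [pvP2, e0, Bool.not_true, Bool.false_and]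
        simp [hr, e0, ih]
      · have e0' : pvP0 qs a = false := by simpa using e0
        by_cases e1 : pvP1 qs a = true
        · have hr : pvRk qs a = some (1, a) := by simp [pvRk, e0', e1]
          have e2 : pvP2 qs a = false := by
            have h1t : PySem.Str.startswith (pyBlobOf a) qs = true := by
              have h := e1
              simp only [pvP1, Bool.and_eq_true] at h
              exact h.2
            simp only [pvP2, h1t, Bool.not_true, Bool.false_and, Bool.and_false]
          simp [hr, e0', ih]
        · have e1' : pvP1 qs a = false := by simpa using e1
          by_cases e2 : pvP2 qs a = true
          · have hr : pvRk qs a = some (2, a) := by simp [pvRk, e0', e1', e2]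
            simp [hr, e0', ih]
          · have e2' : pvP2 qs a = false := by simpa using e2
            have hr : pvRk qs a = none := by simp [pvRk, e0', e1', e2']
            simp [hr, e0', ih]

lemma rk_filter1 (qs : String) (pool : List (List (String × String))) :
    (pool.filterMap (pvRk qs)).filter (fun t => t.1 == 1)
      = (pool.filter (pvP1 qs)).map (fun a => (1, a)) := by
  induction pool with
  | nil => simp
  | cons a pool ih =>
      simp only [List.filterMap_cons, List.filter_cons]
      by_cases e0 : pvP0 qs a = true
      · have hr : pvRk qs a = some (0, a) := by simp [pvRk, e0]
        have e1 : pvP1 qs a = false := by simp only [pvP1, e0, Bool.not_true, Bool.false_and]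
        have e2 : pvP2 qs a = false := by simp only [pvP2, e0, Bool.not_true, Bool.false_and]
        simp [hr, e1, ih]
      · have e0' : pvP0 qs a = false := by simpa using e0
        by_cases e1 : pvP1 qs a = true
        · have hr : pvRk qs a = some (1, a) := by simp [pvRk, e0', e1]
          have e2 : pvP2 qs a = false := by
            have h1t : PySem.Str.startswith (pyBlobOf a) qs = true := by
              have h := e1
              simp only [pvP1, Bool.and_eq_true] at h
              exact h.2
            simp only [pvP2, h1t, Bool.not_true, Bool.false_and, Bool.and_false]
          simp [hr, e1, ih]
        · have e1' : pvP1 qs a = false := by simpa using e1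
          by_cases e2 : pvP2 qs a = true
          · have hr : pvRk qs a = some (2, a) := by simp [pvRk, e0', e1', e2]
            simp [hr, e1', ih]
          · have e2' : pvP2 qs a = false := by simpa using e2
            have hr : pvRk qs a = none := by simp [pvRk, e0', e1', e2']
            simp [hr, e1', ih]

lemma rk_filter2 (qs : String) (pool : List (List (String × String))) :
    (pool.filterMap (pvRk qs)).filter (fun t => t.1 == 2)
      = (pool.filter (pvP2 qs)).map (fun a => (2, a)) := by
  induction pool with
  | nil => simp
  | cons a pool ih =>
      simp only [List.filterMap_cons, List.filter_cons]
      by_cases e0 : pvP0 qs a = true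
      · have hr : pvRk qs a = some (0, a) := by simp [pvRk, e0]
        have e1 : pvP1 qs a = false := by simp only [pvP1, e0, Bool.not_true, Bool.false_and]
        have e2 : pvP2 qs a = false := by simp only [pvP2, e0, Bool.not_true, Bool.false_and]
        simp [hr, e2, ih]
      · have e0' : pvP0 qs a = false := by simpa using e0
        by_cases e1 : pvP1 qs a = true
        · have hr : pvRk qs a = some (1, a) := by simp [pvRk, e0', e1]
          have e2 : pvP2 qs a = false := by
            have h1t : PySem.Str.startswith (pyBlobOf a) qs = true := by
              have h := e1
              simp only [pvP1, Bool.and_eq_true] at h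
              exact h.2
            simp only [pvP2, h1t, Bool.not_true, Bool.false_and, Bool.and_false]
          simp [hr, e2, ih]
        · have e1' : pvP1 qs a = false := by simpa using e1
          by_cases e2 : pvP2 qs a = true
          · have hr : pvRk qs a = some (2, a) := by simp [pvRk, e0', e1', e2]
            simp [hr, e2, ih]
          · have e2' : pvP2 qs a = false := by simpa using e2
            have hr : pvRk qs a = none := by simp [pvRk, e0', e1', e2']
            simp [hr, e2', ih]

lemma rk_le_two (qs : String) (pool : List (List (String × String)))
    (t : Nat × List (String × String)) (ht : t ∈ pool.filterMap (pvRk qs)) : t.1 ≤ 2 := by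
  rw [List.mem_filterMap] at ht
  obtain ⟨a, -, heq⟩ := ht
  unfold pvRk at heq
  split_ifs at heq <;> (try cases heq) <;> simp

lemma insertBy_all_before {α : Type} (b : α → α → Bool) (x : α) (zs : List α)
    (h : ∀ z ∈ zs, b x z = true) : PySem.List.insertBy b x zs = x :: zs := by
  cases zs with
  | nil => simp [PySem.List.insertBy]
  | cons z zs => simp [PySem.List.insertBy, h z (List.mem_cons_self ..)]

lemma insertBy_append_left {α : Type} (b : α → α → Bool) (x : α) (ys zs : List α)
    (h : ∀ y ∈ ys, b x y = false) :
    PySem.List.insertBy b x (ys ++ zs) = ys ++ PySem.List.insertBy b x zs := by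
  induction ys with
  | nil => simp
  | cons y ys ih =>
      simp only [List.cons_append, PySem.List.insertBy, h y (List.mem_cons_self ..)]
      simp [ih fun y hy => h y (List.mem_cons_of_mem _ hy)]

set_option maxHeartbeats 1600000 in
lemma foldl_insertBy_partition {α : Type} (xs : List (Nat × α)) (l0 l1 l2 : List (Nat × α))
    (h0 : ∀ t ∈ l0, t.1 = 0) (h1 : ∀ t ∈ l1, t.1 = 1) (h2 : ∀ t ∈ l2, t.1 = 2)
    (hx : ∀ t ∈ xs, t.1 ≤ 2) :
    xs.foldl (fun acc x => PySem.List.insertBy (fun a b => decide (a.1 < b.1)) x acc) (l0 ++ l1 ++ l2)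
      = (l0 ++ xs.filter (fun t => t.1 == 0)) ++ (l1 ++ xs.filter (fun t => t.1 == 1))
          ++ (l2 ++ xs.filter (fun t => t.1 == 2)) := by
  induction xs generalizing l0 l1 l2 with
  | nil => simp
  | cons x xs ih =>
      have hx2 : x.1 ≤ 2 := hx x (List.mem_cons_self ..)
      have hxs : ∀ t ∈ xs, t.1 ≤ 2 := fun t ht => hx t (List.mem_cons_of_mem _ ht)
      simp only [List.foldl_cons]
      rcases (by omega : x.1 = 0 ∨ x.1 = 1 ∨ x.1 = 2) with hk | hk | hk
      · have step : PySem.List.insertBy (fun a b => decide (a.1 < b.1)) x (l0 ++ l1 ++ l2)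
            = (l0 ++ [x]) ++ l1 ++ l2 := by
          rw [List.append_assoc, insertBy_append_left _ _ _ _
            (fun y hy => by simp [h0 y hy, hk]),
            insertBy_all_before _ _ _ (fun z hz => by
              rcases List.mem_append.1 hz with h | h
              · simp [h1 z h, hk]
              · simp [h2 z h, hk])]
          simp
        rw [step, ih (l0 ++ [x]) l1 l2
          (fun t ht => by
            rcases List.mem_append.1 ht with h | h
            · exact h0 t h
            · rw [List.mem_singleton] at h; subst h; exact hk) h1 h2 hxs]
        simp [ hk]
      · have step : PySem.List.insertBy (fun a b => decide (a.1 < b.1)) x (l0 ++ l1 ++ l2)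
            = l0 ++ (l1 ++ [x]) ++ l2 := by
          rw [List.append_assoc, insertBy_append_left _ _ _ _
            (fun y hy => by simp [h0 y hy, hk]),
            insertBy_append_left _ _ _ _ (fun y hy => by simp [h1 y hy, hk]),
            insertBy_all_before _ _ _ (fun z hz => by simp [h2 z hz, hk])]
          simp
        rw [step, ih l0 (l1 ++ [x]) l2 h0
          (fun t ht => by
            rcases List.mem_append.1 ht with h | h
            · exact h1 t h
            · rw [List.mem_singleton] at h; subst h; exact hk) h2 hxs]
        simp [ hk]
      · have step : PySem.List.insertBy (fun a b => decide (a.1 < b.1)) x (l0 ++ l1 ++ l2)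
            = l0 ++ l1 ++ (l2 ++ [x]) := by
          rw [PySem.List.insertBy_of_forall_not_before _ _ _ (fun y hy => by
            rcases List.mem_append.1 hy with h | h
            · rcases List.mem_append.1 h with h' | h'
              · simp [h0 y h', hk]
              · simp [h1 y h', hk]
            · simp [h2 y h, hk])]
          simp
        rw [step, ih l0 l1 (l2 ++ [x]) h0 h1
          (fun t ht => by
            rcases List.mem_append.1 ht with h | h
            · exact h2 t h
            · rw [List.mem_singleton] at h; subst h; exact hk) hxs]
        simp [ hk]

-- a stable sort on a rank bounded by 2 is the concatenation of the three rank classes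
lemma sorted_rank_partition {α : Type} (xs : List (Nat × α)) (hx : ∀ t ∈ xs, t.1 ≤ 2) :
    PySem.List.sorted xs (fun t => t.1)
      = xs.filter (fun t => t.1 == 0) ++ xs.filter (fun t => t.1 == 1) ++ xs.filter (fun t => t.1 == 2) := by
  have := foldl_insertBy_partition xs ([] : List (Nat × α)) [] [] (by simp) (by simp) (by simp) hx
  rw [PySem.List.sorted_eq_foldl_insertBy]
  simpa using this

-- the two dedup loops walk the same airports and keep the same state, read differently:
-- (seen, out) on the A side is (keys, values) of B's dict
lemma dedup_eq (L : List (List (String × String))) (d : PySem.Dict String (List (String × String))) :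
    L.foldl
      (fun (st : PySem.Set String × List (List (String × String))) a =>
        let c := pyCodeOf a
        if PySem.Set.contains st.1 c then st else (PySem.Set.add st.1 c, st.2 ++ [a]))
      (d.keys, d.values)
    = ((L.foldl (fun d a => d.setdefault (pyCodeOf a) a) d).keys,
       (L.foldl (fun d a => d.setdefault (pyCodeOf a) a) d).values) := by
  induction L generalizing d with
  | nil => simp
  | cons a L ih =>
      simp only [List.foldl_cons]
      have hc : PySem.Set.contains d.keys (pyCodeOf a) = d.contains (pyCodeOf a) := by
        simp [PySem.Set.contains_eq_listContains, PySem.Dict.contains_eq_decide_mem_keys]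
      by_cases hcd : d.contains (pyCodeOf a) = true
      · rw [PySem.Dict.setdefault_of_contains _ _ hcd]
        simp only [hc, hcd, reduceIte]
        exact ih d
      · have hcd' : d.contains (pyCodeOf a) = false := by simpa using hcd
        have hkeys : (d.setdefault (pyCodeOf a) a).keys = d.keys ++ [pyCodeOf a] := by
          simp only [PySem.Dict.setdefault, hcd', Bool.false_eq_true, reduceIte,
            PySem.Dict.keys, List.map_append, List.map_cons, List.map_nil]
        have hvals : (d.setdefault (pyCodeOf a) a).values = d.values ++ [a] := by
          simp only [PySem.Dict.setdefault, hcd', Bool.false_eq_true, reduceIte,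
            PySem.Dict.values, List.map_append, List.map_cons, List.map_nil]
        have hadd : PySem.Set.add d.keys (pyCodeOf a) = d.keys ++ [pyCodeOf a] := by
          simp only [PySem.Set.add, hc, hcd',
            Bool.false_eq_true, reduceIte]
        simp only [hc, hcd', Bool.false_eq_true, reduceIte, hadd, ← hkeys, ← hvals]
        exact ih (d.setdefault (pyCodeOf a) a)

-- ===== VERDICT (by name: the statement is the Claim_ definition above) =====
theorem search_local_airports_py_spec : Claim_equal_search_local_airports_py := by
  unfold Claim_equal_search_local_airports_py Spec_search_local_airports_py
  intro q pool _ _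
  simp only [search_local_airports_py, search_local_airports_py_alt]
  by_cases hq : pyNormalize q = ""
  · simp [hq]
  · simp only [hq, if_false]
    rw [bucketsFold_eq, rankedFold_eq]
    simp only [List.nil_append]
    rw [sorted_rank_partition _ (rk_le_two _ pool)]
    rw [rk_filter0, rk_filter1, rk_filter2]
    rw [show (PySem.Set.empty, ([] : List (List (String × String))))
        = ((PySem.Dict.mk ([] : List (String × List (String × String)))).keys,
           (PySem.Dict.mk ([] : List (String × List (String × String)))).values) from rfl]
    rw [dedup_eq]
    simp [List.foldl_append, List.foldl_map]
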